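-- pv_equiv track=rewrite | github.com/estensen/knowit-kodekalender | 16/16.py | get_biggest_palindrome
-- ===== SOURCE A (Python) =====
-- from typing import List
--
-- def is_prime(n: int) -> bool:
--     """Check if integer n is a prime"""
--     if n < 2:
--         return False
--     # 2 is the only even prime number
--     elif n == 2:
--         return True
--     # All other even numbers are not primes
--     elif not n & 1:
--         return False
--
--     # Range starts with 3 and only needs to go up
--     # The square root of n for all odd numbers
--     for x in range(3, int(n**0.5) + 1, 2):
--         if n % x == 0:
--             return False
--
--     return True
--
-- def get_biggest_palindrome(nums: List[int], ix: int) -> int: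
--     biggest_palindrome = 0
--     palindrome_sum = nums[ix]
--
--     for i in range(1, len(nums) // 2):
--         if i > ix:
--             break
--         elif ix + i > len(nums) - 1:
--             break
--         elif nums[ix-i] != nums[ix+i]:
--             break
--
--         palindrome_sum += nums[ix-i] + nums[ix+i]
--         if is_prime(palindrome_sum):
--             biggest_palindrome = palindrome_sum
--
--     return biggest_palindrome
-- ===== SOURCE B (Python) =====
-- from typing import List
--
-- def is_prime(n: int) -> bool:
--     """Check if integer n is a prime"""
--     if n < 2:
--         return False
--     elif n == 2:
--         return True
--     elif not n & 1:
--         return False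
--     for x in range(3, int(n**0.5) + 1, 2):
--         if n % x == 0:
--             return False
--     return True
--
-- def get_biggest_palindrome(nums: List[int], ix: int) -> int:
--     # Phase 1: expand outward, collecting the symmetric cumulative sums by radius.
--     n = len(nums)
--     total = nums[ix]
--     sums = []
--     i = 1
--     while i < n // 2 and i <= ix and ix + i <= n - 1 and nums[ix - i] == nums[ix + i]:
--         total += 2 * nums[ix + i]
--         sums.append(total)
--         i += 1
--     # Phase 2: largest radius first, return the first prime sum.
--     for s in reversed(sums):
--         if is_prime(s):
--             return s
--     return 0
-- ===== Notes on version B (the rewrite author's own statement) =====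
-- stated objective: alternative
-- what changed: Single interleaved expand-and-test loop replaced by two phases: first collect the symmetric cumulative sums by radius (same break conditions), then scan those sums from the largest radius down and return the first prime, so the primality test and the expansion are decoupled and the reverse scan can exit early.
-- outside the precondition, e.g. on get_biggest_palindrome([], 0): A raises IndexError, B raises IndexError; on get_biggest_palindrome([1, 2, 3], 5): A raises IndexError, B raises IndexError
import Mathlib
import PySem

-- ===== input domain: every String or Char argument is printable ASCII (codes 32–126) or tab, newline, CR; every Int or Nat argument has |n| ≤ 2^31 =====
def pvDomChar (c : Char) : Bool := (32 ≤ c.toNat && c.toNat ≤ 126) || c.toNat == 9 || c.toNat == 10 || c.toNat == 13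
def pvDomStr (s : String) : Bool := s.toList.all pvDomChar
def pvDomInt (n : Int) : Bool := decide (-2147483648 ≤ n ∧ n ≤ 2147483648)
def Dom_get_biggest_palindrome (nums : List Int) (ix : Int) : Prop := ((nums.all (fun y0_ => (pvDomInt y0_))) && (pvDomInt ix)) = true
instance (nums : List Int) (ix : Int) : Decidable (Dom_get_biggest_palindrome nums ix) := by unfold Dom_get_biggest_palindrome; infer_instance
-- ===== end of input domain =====

-- B splits A's single interleaved loop into two phases (collect radius sums, then reverse-scan
-- for the first prime); return values proved equal wherever A does not raise (objective: alternative).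

-- ===== PORT A =====
-- is_prime: shared helper, identical source in Source A and Source B.
-- int(n**0.5) is ported as Nat.sqrt, which agrees with Python's float computation on this domain.
def is_prime (n : Int) : Bool :=
  if n < 2 then false
  else if n == 2 then true
  else if PySem.Int.band n 1 == 0 then false
  else (PySem.List.pyRange 3 ((Nat.sqrt n.toNat : Int) + 1) 2).all
        (fun x => !(PySem.Int.mod n x == 0))

-- the for-loop of A, carrying (biggest_palindrome, palindrome_sum); early `break` = return biggest
def getPalLoop (nums : List Int) (ix : Int) : List Int → Int → Int → Int
  | [], big, _ => big
  | i :: rest, big, psum =>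
    if i > ix then big
    else if ix + i > (nums.length : Int) - 1 then big
    else
      match PySem.List.pyGet? nums (ix - i), PySem.List.pyGet? nums (ix + i) with
      | some a, some b =>
        if a ≠ b then big
        else
          if is_prime (psum + a + b) then getPalLoop nums ix rest (psum + a + b) (psum + a + b)
          else getPalLoop nums ix rest big (psum + a + b)
      | _, _ => big  -- unreachable: the guards keep both indices in range

def get_biggest_palindrome (nums : List Int) (ix : Int) : Int :=
  match PySem.List.pyGet? nums ix with
  | none => 0  -- IndexError in Python; excluded by Pre_
  | some v =>
      getPalLoop nums ix (PySem.List.pyRange 1 (PySem.Int.floordiv (nums.length : Int) 2) 1) 0 v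

-- ===== PORT B =====
-- phase 1 of Source B: the while loop collecting the symmetric cumulative sums by radius
-- (fuel = n // 2 bounds the loop, which stops via the i < n // 2 condition)
def palSums (nums : List Int) (ix : Int) : Nat → Int → Int → List Int
  | 0, _, _ => []
  | fuel+1, i, total =>
    if i < PySem.Int.floordiv (nums.length : Int) 2 ∧ i ≤ ix ∧ ix + i ≤ (nums.length : Int) - 1
        ∧ PySem.List.pyGet? nums (ix - i) = PySem.List.pyGet? nums (ix + i) then
      match PySem.List.pyGet? nums (ix + i) with
      | some v => (total + 2 * v) :: palSums nums ix fuel (i + 1) (total + 2 * v)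
      | none => []  -- unreachable: the guard keeps the index in range
    else []

def get_biggest_palindrome_alt (nums : List Int) (ix : Int) : Int :=
  match PySem.List.pyGet? nums ix with
  | none => 0  -- IndexError in Python; excluded by Pre_
  | some v =>
      -- phase 2 of Source B: first prime among the sums, largest radius first
      match (palSums nums ix (nums.length / 2) 1 v).reverse.find? is_prime with
      | some s => s
      | none => 0

-- ===== PRECONDITION & SPEC =====
-- A raises IndexError on nums[ix] iff ix is outside [-len(nums), len(nums)); exactly those inputs are excluded.
def Pre_get_biggest_palindrome (nums : List Int) (ix : Int) : Prop :=
  PySem.Raise.InRange nums.length ix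
instance (nums : List Int) (ix : Int) : Decidable (Pre_get_biggest_palindrome nums ix) := by
  unfold Pre_get_biggest_palindrome; infer_instance
def pvWitness_get_biggest_palindrome : List Int × Int := ([1, 2, 3, 2, 1, 4], 2)

def Spec_get_biggest_palindrome (nums : List Int) (ix : Int) (out : Int) : Prop := out = get_biggest_palindrome_alt nums ix
instance (nums : List Int) (ix : Int) (out : Int) : Decidable (Spec_get_biggest_palindrome nums ix out) := by unfold Spec_get_biggest_palindrome; infer_instance

-- ===== CLAIM (what is proved, stated in full; the proofs are below) =====
def Claim_equal_get_biggest_palindrome : Prop := ∀ (nums : List Int) (ix : Int), Dom_get_biggest_palindrome nums ix → Pre_get_biggest_palindrome nums ix → Spec_get_biggest_palindrome nums ix (get_biggest_palindrome nums ix)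

-- ===== LEMMAS AND PROOFS =====

-- an in-range Python index always yields a value
lemma pvGetSome {α : Type} (xs : List α) (i : Int) (h : PySem.Raise.InRange xs.length i) :
    ∃ a, PySem.List.pyGet? xs i = some a := by
  obtain ⟨h1, h2⟩ := h
  by_cases h0 : 0 ≤ i
  · exact ⟨_, PySem.List.pyGet?_eq_some_getElem xs h0 h2⟩
  · push_neg at h0
    rw [PySem.List.pyGet?_neg xs h0 h1]
    have : xs.length - (-i).toNat < xs.length := by omega
    exact ⟨_, List.getElem?_eq_getElem this⟩

-- A's loop over the remaining radii equals: first prime in B's remaining sums (outermost first),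
-- defaulting to A's current `biggest_palindrome`.
lemma getPalLoop_eq_palSums (nums : List Int) (ix : Int) :
    ∀ (fuel : Nat) (i big psum : Int), 1 ≤ i →
      (PySem.Int.floordiv (nums.length : Int) 2 - i).toNat ≤ fuel →
      getPalLoop nums ix (PySem.List.pyRange i (PySem.Int.floordiv (nums.length : Int) 2) 1) big psum
        = (match (palSums nums ix fuel i psum).reverse.find? is_prime with
            | some s => s
            | none => big) := by
  intro fuel
  induction fuel with
  | zero =>
      intro i big psum hi hf
      rw [PySem.List.pyRange_one_eq_nil (by omega)]
      simp [getPalLoop, palSums]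
  | succ fuel ih =>
      intro i big psum hi hf
      have h2 : PySem.Int.floordiv ((nums.length : Int)) 2 = (nums.length : Int) / 2 :=
        PySem.Int.floordiv_eq_ediv_of_pos (by omega)
      rw [h2] at hf ⊢
      by_cases him : i < (nums.length : Int) / 2
      case neg =>
        rw [PySem.List.pyRange_one_eq_nil (by omega)]
        simp [getPalLoop, palSums, h2, him]
      case pos =>
      rw [PySem.List.pyRange_one_cons him]
      by_cases hix : i > ix
      · simp [getPalLoop, palSums, h2, hix, not_le.mpr hix]
      · by_cases hbnd : ix + i > (nums.length : Int) - 1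
        · simp [getPalLoop, palSums, h2, him, hbnd,
            show ¬ ix < i by omega, show ¬ ix + i < (nums.length : Int) by omega]
        · push_neg at hix hbnd
          obtain ⟨a, ha⟩ := pvGetSome nums (ix - i) ⟨by omega, by omega⟩
          obtain ⟨b, hb⟩ := pvGetSome nums (ix + i) ⟨by omega, by omega⟩
          by_cases hab : a = b
          · subst hab
            have hAside : getPalLoop nums ix
                (i :: PySem.List.pyRange (i + 1) ((nums.length : Int) / 2) 1) big psum
                = if is_prime (psum + a + a) then
                    getPalLoop nums ix (PySem.List.pyRange (i + 1) ((nums.length : Int) / 2) 1)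
                      (psum + a + a) (psum + a + a)
                  else
                    getPalLoop nums ix (PySem.List.pyRange (i + 1) ((nums.length : Int) / 2) 1)
                      big (psum + a + a) := by
              simp [getPalLoop, ha, hb, show ¬ ix < i by omega,
                show ¬ (nums.length : Int) - 1 < ix + i by omega]
            have hBside : palSums nums ix (fuel + 1) i psum
                = (psum + 2 * a) :: palSums nums ix fuel (i + 1) (psum + 2 * a) := by
              simp [palSums, ha, hb, h2, him, hix, show ix + i < (nums.length : Int) by omega]
            rw [show psum + a + a = psum + 2 * a from by ring] at hAside
            rw [hAside, hBside, List.reverse_cons, List.find?_append]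
            have hrec := ih (i + 1) (if is_prime (psum + 2 * a) then psum + 2 * a else big)
              (psum + 2 * a) (by omega) (by omega)
            rw [h2] at hrec
            by_cases hp : is_prime (psum + 2 * a) = true
            · simp only [hp, if_true] at hrec ⊢
              rw [hrec]
              cases hfind : (palSums nums ix fuel (i + 1) (psum + 2 * a)).reverse.find? is_prime <;>
                simp [hfind, List.find?, hp]
            · simp only [hp, if_false, Bool.false_eq_true] at hrec ⊢
              rw [hrec]
              cases hfind : (palSums nums ix fuel (i + 1) (psum + 2 * a)).reverse.find? is_prime <;>
                simp [hfind, List.find?, hp]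
          · simp [getPalLoop, palSums, ha, hb, h2, hab, show ¬ ix < i by omega,
              show ¬ (nums.length : Int) - 1 < ix + i by omega]

-- ===== VERDICT (by name: the statement is the Claim_ definition above) =====
theorem get_biggest_palindrome_spec : Claim_equal_get_biggest_palindrome := by
  intro nums ix _ hpre
  unfold Spec_get_biggest_palindrome get_biggest_palindrome get_biggest_palindrome_alt
  obtain ⟨v, hv⟩ := pvGetSome nums ix hpre
  rw [hv]
  have hfd : PySem.Int.floordiv (nums.length : Int) 2 = ((nums.length / 2 : Nat) : Int) := by
    exact_mod_cast PySem.Int.floordiv_natCast nums.length 2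
  exact getPalLoop_eq_palSums nums ix (nums.length / 2) 1 0 v (by omega) (by omega)
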